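-- pv_equiv track=rewrite | github.com/ffavela/mset | mset_lib/core.py | MG
-- ===== SOURCE A (Python) =====
-- def tOp(xStr, LL):
--     return [[xStr] + e for e in LL]
--
-- def wL(L):
--     if L[0] == 1:
--         return L[1:]
--     return [L[0]-1]+L[1:]
--
-- def MG(M,k):
--     M.sort(key=len, reverse=True)
--     L=[len(m) for m in M]
--     N=sum(L)
--     S=[e for sublist in M for e in sublist]
--     def g(k,L,i=0):
--         if i > N-k:
--             return [ ]
--         if k == 0:
--             return [[ ]]
--         return tOp(S[i],g(k-1,wL(L),i+1))+g(k,L[1:],i+L[0])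
--     return g(k,L)
-- ===== SOURCE B (Python) =====
-- # B: group-wise prefix-count recursion (no flattening, no index arithmetic);
-- # like A it sorts M in place by length descending (same observable mutation).
-- def MG(M, k):
--     M.sort(key=len, reverse=True)
--     def rec(groups, kk):
--         if not groups:
--             return [[]] if kk == 0 else []
--         g0, rest = groups[0], groups[1:]
--         return [g0[:c] + t
--                 for c in range(min(len(g0), kk), -1, -1)
--                 for t in rec(rest, kk - c)]
--     return rec(M, k)
-- ===== Notes on version B (the rewrite author's own statement) =====
-- stated objective: alternative
-- what changed: A flattens the sorted groups into one element list and recurses on a flat index with a mutated lengths list (take S[i] / skip the rest of the group); B recurses group by group, choosing a prefix count c for each group and emitting group[:c] + tail, with no flattening and no index arithmetic.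
import Mathlib
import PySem

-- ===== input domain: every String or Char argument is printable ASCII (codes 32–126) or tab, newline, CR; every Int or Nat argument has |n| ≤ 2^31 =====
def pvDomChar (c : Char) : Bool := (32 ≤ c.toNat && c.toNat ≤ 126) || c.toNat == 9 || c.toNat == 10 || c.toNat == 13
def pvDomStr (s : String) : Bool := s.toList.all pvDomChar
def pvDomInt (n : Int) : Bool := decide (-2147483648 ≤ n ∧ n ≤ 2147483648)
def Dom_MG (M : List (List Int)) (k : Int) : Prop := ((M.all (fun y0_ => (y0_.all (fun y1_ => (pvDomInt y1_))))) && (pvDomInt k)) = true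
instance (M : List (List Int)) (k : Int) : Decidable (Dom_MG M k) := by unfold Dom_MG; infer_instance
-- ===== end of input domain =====

-- B replaces A's flattened-list index recursion by a group-wise prefix-count recursion
-- (objective: alternative). Both programs sort M in place by length, descending; the
-- equivalence proved here is about the RETURN value (B performs the same mutation).

-- ===== PORT A =====
-- tOp(xStr, LL)
def tOpA (x : Int) (LL : List (List Int)) : List (List Int) := LL.map (fun e => x :: e)

-- inner g(k, L, i); `none` = a Python exception (S[i] or L[0] out of range);
-- fuel only counts recursion depth, MG passes enough for every call that returns (proved below)
def gA (S : List Int) (N : Int) : Nat → Int → List Int → Int → Option (List (List Int))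
  | 0, _, _, _ => none
  | fuel + 1, k, L, i =>
    if i > N - k then some []
    else if k = 0 then some [[]]
    else
      match PySem.List.pyGet? S i with
      | none => none
      | some x =>
        match L with
        | [] => none          -- wL(L) / L[0] raises IndexError
        | l0 :: rest => do
            -- wL(L) inlined: if L[0] == 1 then L[1:] else [L[0]-1] + L[1:]
            let r1 ← gA S N fuel (k - 1) (if l0 = 1 then rest else (l0 - 1) :: rest) (i + 1)
            let r2 ← gA S N fuel k rest (i + l0)
            pure (tOpA x r1 ++ r2)

def MG (M : List (List Int)) (k : Int) : List (List Int) :=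
  let Ms := PySem.List.sorted M (fun m => m.length) true   -- M.sort(key=len, reverse=True)
  let L := Ms.map (fun m => (m.length : Int))
  let N := L.sum
  let S := Ms.flatMap id                                    -- flatten
  (gA S N (k.toNat + L.length + 1) k L 0).getD []

-- ===== PORT B =====
-- inner rec(groups, kk)
def recB (groups : List (List Int)) (kk : Int) : List (List Int) :=
  match groups with
  | [] => if kk = 0 then [[]] else []
  | g0 :: rest =>
      (PySem.List.pyRange (min (g0.length : Int) kk) (-1) (-1)).flatMap
        (fun c => (recB rest (kk - c)).map (fun t => PySem.List.slice g0 none (some c) ++ t))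

def MG_alt (M : List (List Int)) (k : Int) : List (List Int) :=
  recB (PySem.List.sorted M (fun m => m.length) true) k

-- ===== PRECONDITION & SPEC =====
-- Pre_ excludes k < 0, on which A's recursion walks past the end of the flattened list and raises IndexError.
def Pre_MG (M : List (List Int)) (k : Int) : Prop := 0 ≤ k
instance (M : List (List Int)) (k : Int) : Decidable (Pre_MG M k) := by unfold Pre_MG; infer_instance
def pvWitness_MG : List (List Int) × Int := ([[1], [2, 3]], 2)

def Spec_MG (M : List (List Int)) (k : Int) (out : List (List Int)) : Prop := out = MG_alt M k
instance (M : List (List Int)) (k : Int) (out : List (List Int)) : Decidable (Spec_MG M k out) := by unfold Spec_MG; infer_instance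

-- ===== CLAIM (what is proved, stated in full; the proofs are below) =====
def Claim_equal_MG : Prop := ∀ (M : List (List Int)) (k : Int), Dom_MG M k → Pre_MG M k → Spec_MG M k (MG M k)

-- ===== LEMMAS AND PROOFS =====

-- counts m, m-1, ..., 0 : the Nat mirror of A's and B's descending loops
def descRange (m : Nat) : List Nat := (List.range (m + 1)).reverse

-- proof-side Nat-indexed reformulation of B's recursion
def recN (Gs : List (List Int)) (k : Nat) : List (List Int) :=
  match Gs with
  | [] => if k = 0 then [[]] else []
  | g0 :: rest =>
      (descRange (min g0.length k)).flatMap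
        (fun c => (recN rest (k - c)).map (fun t => g0.take c ++ t))

-- "zeros at the end": an empty group is followed only by empty groups (true after the sort)
def ZE (Gs : List (List Int)) : Prop := Gs.Pairwise (fun a b => a = [] → b = [])

theorem descRange_succ (m : Nat) : descRange (m + 1) = (m + 1) :: descRange m := by
  simp [descRange, List.range_succ]

theorem mem_descRange {c m : Nat} : c ∈ descRange m ↔ c ≤ m := by
  simp [descRange]

theorem descRange_zero : descRange 0 = [0] := rfl

theorem flatMap_congr_mem {α β : Type} {l : List α} {f g : α → List β}
    (h : ∀ x ∈ l, f x = g x) : l.flatMap f = l.flatMap g := by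
  simp only [List.flatMap]
  rw [List.map_congr_left h]

theorem flatMap_pyRange_desc {β : Type} (m : Nat) (f : Int → List β) :
    (PySem.List.pyRange (m : Int) (-1) (-1)).flatMap f
      = (descRange m).flatMap (fun c : Nat => f (c : Int)) := by
  induction m with
  | zero =>
    rw [show ((0:Nat):Int) = 0 by rfl, show PySem.List.pyRange 0 (-1) (-1) = [0] from rfl]
    rfl
  | succ n ih =>
    have hc : ((n + 1 : Nat) : Int) = (n : Int) + 1 := by simp
    rw [hc, PySem.List.pyRange_neg_one_cons (by omega), descRange_succ,
        List.flatMap_cons, List.flatMap_cons,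
        show (n : Int) + 1 - 1 = (n : Int) by ring, ih, hc]

theorem recB_eq_recN (Gs : List (List Int)) (k : Int) (hk : 0 ≤ k) :
    recB Gs k = recN Gs k.toNat := by
  induction Gs generalizing k with
  | nil =>
    simp only [recB, recN]
    split_ifs with h1 h2 h2 <;> first | rfl | omega
  | cons g0 rest ih =>
    simp only [recB, recN]
    have hmin : min (g0.length : Int) k = ((min g0.length k.toNat : Nat) : Int) := by omega
    rw [hmin, flatMap_pyRange_desc]
    apply flatMap_congr_mem
    intro c hc
    have hcle : c ≤ min g0.length k.toNat := mem_descRange.1 hc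
    have h1 : 0 ≤ k - (c : Int) := by omega
    rw [ih _ h1, PySem.List.slice_to_natCast]
    have h2 : (k - (c : Int)).toNat = k.toNat - c := by omega
    rw [h2]

theorem recN_zero (Gs : List (List Int)) : recN Gs 0 = [[]] := by
  induction Gs with
  | nil => rfl
  | cons g0 rest ih =>
    simp only [recN, Nat.min_zero, descRange_zero, List.flatMap_cons, List.flatMap_nil,
      Nat.zero_sub, List.take_zero, List.nil_append, List.map_id', List.append_nil, ih]

theorem recN_nil_of_lt (Gs : List (List Int)) (k : Nat)
    (h : Gs.flatten.length < k) : recN Gs k = [] := by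
  induction Gs generalizing k with
  | nil => simp at h; simp [recN]; omega
  | cons g0 rest ih =>
    simp only [recN]
    rw [List.flatMap_eq_nil_iff]
    intro c hc
    have hcle : c ≤ min g0.length k := mem_descRange.1 hc
    have hlen : rest.flatten.length < k - c := by
      have h2 : (g0 ++ rest.flatten).length < k := by simpa [List.flatten_cons] using h
      rw [List.length_append] at h2
      omega
    rw [ih _ hlen]
    rfl

theorem recN_nil_cons (rest : List (List Int)) (k : Nat) :
    recN ([] :: rest) k = recN rest k := by
  simp [recN, descRange_zero]

theorem recN_step (x : Int) (xs : List Int) (rest : List (List Int)) (k : Nat) (hk : 0 < k) :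
    recN ((x :: xs) :: rest) k = tOpA x (recN (xs :: rest) (k - 1)) ++ recN rest k := by
  have hm : min (x :: xs).length k = min xs.length (k - 1) + 1 := by
    simp [List.length_cons]; omega
  rw [show recN ((x :: xs) :: rest) k =
      (descRange (min (x :: xs).length k)).flatMap
        (fun c => (recN rest (k - c)).map (fun t => (x :: xs).take c ++ t)) from rfl]
  rw [hm]
  have hsplit : descRange (min xs.length (k - 1) + 1)
      = (descRange (min xs.length (k - 1))).map (· + 1) ++ [0] := by
    simp [descRange, List.range_succ_eq_map]
  rw [hsplit, List.flatMap_append]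
  congr 1
  · rw [List.flatMap_map]
    rw [show recN (xs :: rest) (k - 1) =
        (descRange (min xs.length (k - 1))).flatMap
          (fun c => (recN rest (k - 1 - c)).map (fun t => xs.take c ++ t)) from rfl]
    unfold tOpA
    rw [List.map_flatMap]
    apply flatMap_congr_mem
    intro c hc
    rw [show k - (c + 1) = k - 1 - c by omega]
    simp [List.map_map, List.take_succ_cons, Function.comp_def]
  · simp

-- the heart of the proof: A's flattened-index recursion computes recN of the remaining groups
theorem gA_eq_recN (S : List Int) : ∀ (fuel : Nat) (Gs : List (List Int)) (k i : Nat),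
    k + Gs.length < fuel → ZE Gs → i ≤ S.length → S.drop i = Gs.flatten →
    gA S (S.length : Int) fuel (k : Int) (Gs.map (fun g => (g.length : Int))) (i : Int)
      = some (recN Gs k) := by
  intro fuel
  induction fuel with
  | zero => intro Gs k i hfuel _ _ _; omega
  | succ fuel ih =>
    intro Gs k i hfuel hze hi hdrop
    have hflen : Gs.flatten.length = S.length - i := by
      rw [← hdrop, List.length_drop]
    simp only [gA]
    by_cases hg : ((i : Int) > (S.length : Int) - (k : Int))
    · rw [if_pos hg, recN_nil_of_lt Gs k (by omega)]
    · rw [if_neg hg]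
      by_cases hk0 : k = 0
      · subst hk0
        rw [if_pos (by simp), recN_zero]
      · rw [if_neg (by exact_mod_cast hk0)]
        have hiS : i < S.length := by omega
        rw [PySem.List.pyGet?_natCast, List.getElem?_eq_getElem hiS]
        match Gs, hze with
        | [], _ => simp at hflen; omega
        | [] :: rest, hze =>
          exfalso
          have hrest : ∀ g ∈ rest, g = [] := by
            have := List.pairwise_cons.1 hze
            exact fun g hg => this.1 g hg rfl
          have : (([] : List Int) :: rest).flatten = [] := by
            rw [List.flatten_eq_nil_iff]
            intro l hl
            rcases hl with _ | hl
            · rfl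
            · exact hrest _ (by assumption)
          rw [this] at hflen; simp at hflen; omega
        | (x :: xs) :: rest, hze =>
          have hze' : ZE rest := (List.pairwise_cons.1 hze).2
          have hSx : S[i] = x := by
            have h0 : (S.drop i)[0]'(by rw [hdrop]; simp) = x := by
              simp [hdrop]
            rw [List.getElem_drop] at h0
            simpa using h0
          rw [hSx]
          simp only [List.map_cons]
          have hdropcons : S.drop i = x :: (xs ++ rest.flatten) := by
            simpa using hdrop
          have hdrop1 : S.drop (i + 1) = xs ++ rest.flatten := by
            rw [← List.drop_drop, hdropcons]
            simp
          by_cases hxs : xs = []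
          · subst hxs
            rw [if_pos (by simp)]
            have h1 := ih rest (k - 1) (i + 1) (by simp at hfuel ⊢; omega)
              hze' (by omega) (by simpa using hdrop1)
            have h2 := ih rest k (i + ((x :: ([] : List Int)).length))
              (by simp at hfuel ⊢; omega) hze' (by simp; omega)
              (by rw [← List.drop_drop]
                  rw [hdropcons]; simp)
            rw [show ((k : Int) - 1) = ((k - 1 : Nat) : Int) by omega,
                show ((i : Int) + 1) = ((i + 1 : Nat) : Int) by omega] at *
            rw [h1]
            rw [show ((i : Int) + ((x :: ([] : List Int)).length : Int))
                  = ((i + (x :: ([] : List Int)).length : Nat) : Int) by push_cast; ring] at *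
            rw [h2]
            simp only [Option.bind_eq_bind, Option.bind_some, Option.pure_def]
            rw [recN_step x [] rest k (by omega), recN_nil_cons]
          · have hlen1 : ¬ (((x :: xs).length : Int) = 1) := by
              rcases xs with _ | ⟨y, ys⟩
              · exact absurd rfl hxs
              · simp only [List.length_cons]
                push_cast
                omega
            rw [if_neg hlen1]
            have hcast : ((x :: xs).length : Int) - 1 = ((xs.length : Nat) : Int) := by
              simp
            rw [hcast]
            have hzexs : ZE (xs :: rest) := by
              rw [ZE, List.pairwise_cons]
              exact ⟨fun g hg hx => absurd hx hxs, hze'⟩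
            have h1 := ih (xs :: rest) (k - 1) (i + 1)
              (by simp at hfuel ⊢; omega) hzexs (by omega) (by simpa using hdrop1)
            have h2 := ih rest k (i + (x :: xs).length)
              (by simp at hfuel ⊢; omega) hze'
              (by have := hflen; simp at this ⊢; omega)
              (by rw [← List.drop_drop, hdropcons]
                  simp)
            rw [show ((k : Int) - 1) = ((k - 1 : Nat) : Int) by omega,
                show ((i : Int) + 1) = ((i + 1 : Nat) : Int) by omega] at *
            simp only [List.map_cons] at h1
            rw [h1]
            rw [show ((i : Int) + ((x :: xs).length : Int))
                  = ((i + (x :: xs).length : Nat) : Int) by push_cast; ring]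
            rw [h2]
            simp only [Option.bind_eq_bind, Option.bind_some, Option.pure_def]
            rw [recN_step x xs rest k (by omega)]

theorem sum_map_len_cast (Gs : List (List Int)) :
    (Gs.map (fun g => (g.length : Int))).sum = (Gs.flatten.length : Int) := by
  induction Gs with
  | nil => simp
  | cons g rest ih => simp [ih]

theorem ZE_sorted (M : List (List Int)) :
    ZE (PySem.List.sorted M (fun m => m.length) true) := by
  apply List.Pairwise.imp ?_ (PySem.List.sorted_pairwise_rev M (fun m => m.length))
  intro a b hle ha
  subst ha
  simp only [List.length_nil, Nat.le_zero] at hle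
  exact List.length_eq_zero_iff.1 hle

-- ===== VERDICT (by name: the statement is the Claim_ definition above) =====
theorem MG_spec : Claim_equal_MG := by
  unfold Claim_equal_MG Spec_MG Pre_MG
  intro M k _ hk
  unfold MG MG_alt
  simp only
  rw [List.flatMap_id, sum_map_len_cast]
  have hmain := gA_eq_recN ((PySem.List.sorted M (fun m => m.length) true).flatten)
    (k.toNat + (PySem.List.sorted M (fun m => m.length) true).length + 1)
    (PySem.List.sorted M (fun m => m.length) true) k.toNat 0
    (by omega) (ZE_sorted M) (by omega) (by simp)
  rw [show ((k.toNat : Nat) : Int) = k by omega, show ((0 : Nat) : Int) = 0 by rfl] at hmain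
  rw [List.length_map]
  rw [hmain, Option.getD_some, recB_eq_recN _ _ hk]
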